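-- pv_equiv track=rewrite | github.com/samMeow/googleCodeJam | 2022/Qround/punchcard.py | solution
-- ===== SOURCE A (Python) =====
-- def solution(input):
--     [r, c] = input
--     buffer = []
--     for i in range(2 * r + 1):
--         temp = []
--         for j in range(2 * c + 1):
--             x = '.'
--             if i % 2 == 0 and j % 2 == 0:
--                 x = '+'
--             elif i % 2 == 0:
--                 x = '-'
--             elif j % 2 == 0:
--                 x = '|'
--             temp.append(x)
--         buffer.append(temp)
--     buffer[0][0] = '.'
--     buffer[0][1] = '.'
--     buffer[1][0] = '.'
--     return '\n'.join([ ''.join(x) for x in buffer ])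
-- ===== SOURCE B (Python) =====
-- def solution(input):
--     [r, c] = input
--     even_row = list('+' + '-+' * c)
--     odd_row = list('|' + '.|' * c)
--     buffer = [list(even_row) if i % 2 == 0 else list(odd_row) for i in range(2 * r + 1)]
--     buffer[0][0] = '.'
--     buffer[0][1] = '.'
--     buffer[1][0] = '.'
--     return '\n'.join(''.join(x) for x in buffer)
-- ===== Notes on version B (the rewrite author's own statement) =====
-- stated objective: simpler
-- what changed: Replaces the per-cell nested loop with its (i,j)-parity branch by two row templates built once via string repetition, copied per row by row parity only.
import Mathlib
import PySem

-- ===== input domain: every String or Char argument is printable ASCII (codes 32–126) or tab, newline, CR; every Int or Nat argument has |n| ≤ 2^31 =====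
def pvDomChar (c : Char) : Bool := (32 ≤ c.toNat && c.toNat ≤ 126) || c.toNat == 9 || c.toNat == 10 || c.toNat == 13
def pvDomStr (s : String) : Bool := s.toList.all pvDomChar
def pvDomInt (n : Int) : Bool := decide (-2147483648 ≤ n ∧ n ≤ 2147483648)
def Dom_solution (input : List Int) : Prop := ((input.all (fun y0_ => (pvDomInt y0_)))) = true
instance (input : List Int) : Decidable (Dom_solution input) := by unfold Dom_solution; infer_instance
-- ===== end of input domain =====

-- B builds the grid from two repetition-built row templates chosen by row parity,
-- instead of A's per-cell nested loop with an (i,j)-parity branch (objective: simpler).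


-- ===== PORT A =====
-- buffer[i][j] = '.' assignment; Python raises IndexError out of range, which Pre_ excludes,
-- so the in-range List.set is exact there.
def pvSetCell (buf : List (List Char)) (i j : Nat) (ch : Char) : List (List Char) :=
  buf.set i ((buf.getD i []).set j ch)

-- the inner 'for j in range(2*c+1)' loop of A, building temp for row i
def pvRowA (i c : Int) : List Char :=
  (PySem.List.pyRange 0 (2 * c + 1) 1).foldl
    (fun temp j =>
      temp ++ [if PySem.Int.mod i 2 = 0 ∧ PySem.Int.mod j 2 = 0 then '+'
               else if PySem.Int.mod i 2 = 0 then '-'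
               else if PySem.Int.mod j 2 = 0 then '|'
               else '.']) []

-- the three assignments buffer[0][0]=buffer[0][1]=buffer[1][0]='.' and the '\n'.join,
-- identical lines in both Pythons
def pvFinish (buffer : List (List Char)) : String :=
  String.ofList (PySem.Chars.join ['\n']
    (pvSetCell (pvSetCell (pvSetCell buffer 0 0 '.') 0 1 '.') 1 0 '.'))

def solution (input : List Int) : String :=
  pvFinish ((PySem.List.pyRange 0 (2 * input.getD 0 0 + 1) 1).foldl
    (fun buf i => buf ++ [pvRowA i (input.getD 1 0)]) [])

-- ===== PORT B =====
def solution_alt (input : List Int) : String :=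
  pvFinish ((PySem.List.pyRange 0 (2 * input.getD 0 0 + 1) 1).map
    (fun i => if PySem.Int.mod i 2 = 0
              then '+' :: PySem.List.pyRepeat ['-', '+'] (input.getD 1 0)
              else '|' :: PySem.List.pyRepeat ['.', '|'] (input.getD 1 0)))

-- ===== PRECONDITION & SPEC =====
-- Pre_ excludes exactly the inputs on which Python A raises: a list not of length 2
-- (ValueError on unpacking) and r < 1 or c < 1 (IndexError on the three assignments).
def Pre_solution (input : List Int) : Prop :=
  input.length = 2 ∧ 1 ≤ input.getD 0 0 ∧ 1 ≤ input.getD 1 0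
instance (input : List Int) : Decidable (Pre_solution input) := by unfold Pre_solution; infer_instance
def pvWitness_solution : List Int := [2, 3]

def Spec_solution (input : List Int) (out : String) : Prop := out = solution_alt input
instance (input : List Int) (out : String) : Decidable (Spec_solution input out) := by unfold Spec_solution; infer_instance

-- ===== CLAIM (what is proved, stated in full; the proofs are below) =====
def Claim_equal_solution : Prop := ∀ (input : List Int), Dom_solution input → Pre_solution input → Spec_solution input (solution input)

-- ===== LEMMAS AND PROOFS =====

-- A's inner loop builds exactly B's template for the row's parity (for c = n ≥ 0).
theorem pvRowA_eq (i : Int) (n : Nat) :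
    pvRowA i (n : Int) =
      (if PySem.Int.mod i 2 = 0 then '+' :: PySem.List.pyRepeat ['-', '+'] (n : Int)
       else '|' :: PySem.List.pyRepeat ['.', '|'] (n : Int)) := by
  induction n with
  | zero =>
    have h1 : PySem.List.pyRange 0 1 1 = [0] := by decide
    simp [pvRowA, h1, PySem.List.pyRepeat]
    split_ifs <;> rfl
  | succ m ih =>
    have hsplit : PySem.List.pyRange 0 (2 * ((m : Int) + 1) + 1) 1 =
        PySem.List.pyRange 0 (2 * (m : Int) + 1) 1 ++ [2 * (m : Int) + 1, 2 * (m : Int) + 2] := by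
      have h1 : (2 * ((m : Int) + 1) + 1) = (2 * (m : Int) + 2) + 1 := by ring
      have h2 : (2 * (m : Int) + 2) = (2 * (m : Int) + 1) + 1 := by ring
      rw [h1, PySem.List.pyRange_one_succ_right (by omega), h2,
          PySem.List.pyRange_one_succ_right (by omega)]
      simp
    have hodd : PySem.Int.mod (2 * (m : Int) + 1) 2 = 1 := by
      rw [PySem.Int.mod_eq_emod_of_pos (by omega)]; omega
    have heven : PySem.Int.mod (2 * (m : Int) + 2) 2 = 0 := by
      rw [PySem.Int.mod_eq_emod_of_pos (by omega)]; omega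
    have hrep : ∀ (a b : Char), PySem.List.pyRepeat [a, b] ((m : Int) + 1) =
        PySem.List.pyRepeat [a, b] (m : Int) ++ [a, b] := by
      intro a b
      simp only [PySem.List.pyRepeat]
      have : ((m : Int) + 1).toNat = (m : Int).toNat + 1 := by omega
      rw [this, List.replicate_succ', List.flatten_append]
      simp
    unfold pvRowA at ih ⊢
    push_cast
    rw [hsplit, List.foldl_append]
    rw [ih]
    simp only [List.foldl_cons, List.foldl_nil, hodd, heven, hrep]
    split_ifs <;> simp_all

theorem solution_buffers_eq (input : List Int) (h : 0 ≤ input.getD 1 0) :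
    solution input = solution_alt input := by
  unfold solution solution_alt
  rw [PySem.List.foldl_append_singleton_eq_map (fun i => pvRowA i (input.getD 1 0))
        (PySem.List.pyRange 0 (2 * input.getD 0 0 + 1) 1) []]
  simp only [List.nil_append]
  obtain ⟨n, hn⟩ : ∃ n : Nat, input.getD 1 0 = (n : Int) := ⟨(input.getD 1 0).toNat, by omega⟩
  rw [hn]
  congr 1
  apply List.map_congr_left
  intro i _
  exact pvRowA_eq i n

-- ===== VERDICT (by name: the statement is the Claim_ definition above) =====
theorem solution_spec : Claim_equal_solution := by
  intro input _ hpre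
  obtain ⟨-, -, h2⟩ := hpre
  exact solution_buffers_eq input (by omega)
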